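-- pv_equiv track=rewrite | github.com/fiorescarlatto/advent-of-code.2024 | DAY 14/B.tree-finder.py | room_state
-- ===== SOURCE A (Python) =====
-- def room_state(size, seconds, robots):
--     room = []
--     # CREATE EMPTY ROOM
--     for _ in range(size[1]):
--         room.append( [0]*size[0] )
--     # ADD ROBOTS TO THE ROOM
--     for r in robots:
--         position, velocity = r
--         goal = [
--             (position[0] + seconds * velocity[0]) % size[0],
--             (position[1] + seconds * velocity[1]) % size[1]
--         ]
--         room[ goal[1] ][ goal[0] ] += 1
--     return room
-- ===== SOURCE B (Python) =====
-- def room_state(size, seconds, robots):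
--     W, H = size
--     cells = sorted(((p[1] + seconds * v[1]) % H) * W + (p[0] + seconds * v[0]) % W
--                    for p, v in robots)
--     n = len(cells)
--     grid = []
--     i = 0
--     for y in range(H):
--         row = []
--         while i < n and cells[i] < (y + 1) * W:
--             x = cells[i] - y * W
--             if len(row) == x + 1:
--                 row[-1] += 1
--             else:
--                 row += [0] * (x - len(row)) + [1]
--             i += 1
--         row += [0] * (W - len(row))
--         grid.append(row)
--     return grid
-- ===== Notes on version B (the rewrite author's own statement) =====
-- stated objective: alternative
-- what changed: A scatters: it allocates a zero grid and increments one cell per robot; B sorts: it encodes each robot's wrapped destination as a flat cell index y*W+x, sorts these indices, and emits the grid in a single forward sweep that gap-fills each row with zeros between consecutive occupied cells.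
import Mathlib
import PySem

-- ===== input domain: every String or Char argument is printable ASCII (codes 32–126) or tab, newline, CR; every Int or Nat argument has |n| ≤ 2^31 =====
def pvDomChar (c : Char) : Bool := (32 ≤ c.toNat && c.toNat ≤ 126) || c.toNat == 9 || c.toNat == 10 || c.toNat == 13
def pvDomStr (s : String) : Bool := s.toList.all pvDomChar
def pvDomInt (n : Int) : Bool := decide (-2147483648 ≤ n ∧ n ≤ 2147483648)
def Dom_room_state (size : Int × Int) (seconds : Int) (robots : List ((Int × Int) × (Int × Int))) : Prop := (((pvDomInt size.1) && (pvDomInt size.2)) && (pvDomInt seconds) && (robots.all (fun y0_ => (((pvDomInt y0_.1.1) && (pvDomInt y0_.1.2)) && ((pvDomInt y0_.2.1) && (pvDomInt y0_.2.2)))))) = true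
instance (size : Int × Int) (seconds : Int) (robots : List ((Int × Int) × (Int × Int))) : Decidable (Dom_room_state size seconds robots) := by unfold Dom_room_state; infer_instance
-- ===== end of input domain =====

-- B replaces A's per-robot 2D scatter (zero grid + one increment per robot) by sort-then-sweep:
-- flat cell indices y*W+x are sorted and the grid is emitted in one forward gap-filling sweep
-- (objective: alternative algorithm, comparable cost).

-- ===== PORT A =====
def room_state (size : Int × Int) (seconds : Int) (robots : List ((Int × Int) × (Int × Int))) : List (List Int) :=
  -- for _ in range(size[1]): room.append([0]*size[0])
  let room : List (List Int) := (PySem.List.pyRange 0 size.2 1).map (fun _ => List.replicate size.1.toNat 0)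
  -- room[goal[1]][goal[0]] += 1 ; under Pre_ both indices are nonnegative and in range, so List.modify is exact
  robots.foldl (fun room r =>
    let gx := PySem.Int.mod (r.1.1 + seconds * r.2.1) size.1
    let gy := PySem.Int.mod (r.1.2 + seconds * r.2.2) size.2
    room.modify gy.toNat (fun row => row.modify gx.toNat (· + 1))) room

-- ===== PORT B =====
-- the inner 'while i < n and cells[i] < (y+1)*W' loop of Source B: consume the current row's
-- sorted cell indices, gap-filling the row; returns (finished row, remaining suffix)
def pvFillRow (W y : Int) (row : List Int) : List Int → List Int × List Int
  | [] => (row, [])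
  | c :: cs =>
    if c < (y + 1) * W then
      let x := c - y * W
      let row' := if (row.length : Int) = x + 1
        then row.modify (row.length - 1) (· + 1)                     -- row[-1] += 1 (row nonempty under Pre_)
        else row ++ List.replicate (x - (row.length : Int)).toNat 0 ++ [1]  -- row += [0]*(x-len(row)) + [1]
      pvFillRow W y row' cs
    else (row, c :: cs)

def room_state_alt (size : Int × Int) (seconds : Int) (robots : List ((Int × Int) × (Int × Int))) : List (List Int) :=
  -- cells = sorted(((p1+s*v1) % H)*W + (p0+s*v0) % W for p, v in robots)
  let cells : List Int := PySem.List.sorted (robots.map (fun r =>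
    (PySem.Int.mod (r.1.2 + seconds * r.2.2) size.2) * size.1
      + PySem.Int.mod (r.1.1 + seconds * r.2.1) size.1)) (fun c => c) false
  -- for y in range(H): sweep off row y's cells, pad with zeros to width W
  ((PySem.List.pyRange 0 size.2 1).foldl (fun st y =>
      let res := pvFillRow size.1 y [] st.2
      (st.1 ++ [res.1 ++ List.replicate (size.1 - (res.1.length : Int)).toNat 0], res.2))
    (([] : List (List Int)), cells)).1

-- ===== PRECONDITION & SPEC =====
-- Pre_ is exactly where Python A returns: with robots present, nonpositive width/height makes A
-- raise ZeroDivisionError (size 0) or IndexError (negative size: empty room / empty rows).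
def Pre_room_state (size : Int × Int) (seconds : Int) (robots : List ((Int × Int) × (Int × Int))) : Prop :=
  robots = [] ∨ (0 < size.1 ∧ 0 < size.2)
instance (size : Int × Int) (seconds : Int) (robots : List ((Int × Int) × (Int × Int))) : Decidable (Pre_room_state size seconds robots) := by unfold Pre_room_state; infer_instance
def pvWitness_room_state : (Int × Int) × Int × (List ((Int × Int) × (Int × Int))) := ((3, 2), 1, [((0, 0), (1, 1)), ((2, 1), (-1, 0))])

def Spec_room_state (size : Int × Int) (seconds : Int) (robots : List ((Int × Int) × (Int × Int))) (out : List (List Int)) : Prop := out = room_state_alt size seconds robots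
instance (size : Int × Int) (seconds : Int) (robots : List ((Int × Int) × (Int × Int))) (out : List (List Int)) : Decidable (Spec_room_state size seconds robots out) := by unfold Spec_room_state; infer_instance

-- ===== CLAIM (what is proved, stated in full; the proofs are below) =====
def Claim_equal_room_state : Prop := ∀ (size : Int × Int) (seconds : Int) (robots : List ((Int × Int) × (Int × Int))), Dom_room_state size seconds robots → Pre_room_state size seconds robots → Spec_room_state size seconds robots (room_state size seconds robots)

-- ===== LEMMAS AND PROOFS =====

-- the grid a destination list denotes: cell (x,y) = number of occurrences of (x,y)
def pvGridOf (W H : Int) (g : List (Int × Int)) : List (List Int) :=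
  (PySem.List.pyRange 0 H 1).map (fun y =>
    (PySem.List.pyRange 0 W 1).map (fun x => (PySem.List.count g (x, y) : Int)))

-- ---- A-side: A's scatter loop builds the count grid ----
theorem pvStep (W H : Int) (g : List (Int × Int)) (gx gy : Int)
    (hx0 : 0 ≤ gx) (hxW : gx < W) (hy0 : 0 ≤ gy) (hyH : gy < H) :
    (pvGridOf W H g).modify gy.toNat (fun row => row.modify gx.toNat (· + 1))
      = pvGridOf W H (g ++ [(gx, gy)]) := by
  apply List.ext_getElem
  · simp [pvGridOf, List.length_modify]
  · intro i h1 h2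
    have hi2 : i < (H - 0).toNat := by
      simpa [pvGridOf, PySem.List.length_pyRange_one] using h2
    rw [List.getElem_modify]
    by_cases hi : gy.toNat = i
    · rw [if_pos hi]
      simp only [pvGridOf, List.getElem_map, PySem.List.getElem_pyRange_one]
      apply List.ext_getElem
      · simp [List.length_modify]
      · intro j h3 h4
        have hj2 : j < (W - 0).toNat := by
          simpa [PySem.List.length_pyRange_one] using h4
        rw [List.getElem_modify]
        simp only [List.getElem_map, PySem.List.getElem_pyRange_one,
          PySem.List.count_eq, List.count_append, List.count_singleton]
        by_cases hj : gx.toNat = j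
        · rw [if_pos hj]
          subst hi hj
          rw [Int.toNat_of_nonneg hx0, Int.toNat_of_nonneg hy0]
          simp
        · rw [if_neg hj]
          simp only [beq_iff_eq, Prod.mk.injEq]
          rw [if_neg (by intro hc; omega)]
          simp
    · rw [if_neg hi]
      simp only [pvGridOf, List.getElem_map, PySem.List.getElem_pyRange_one]
      apply List.map_congr_left
      intro x _
      simp only [PySem.List.count_eq, List.count_append, List.count_singleton,
        beq_iff_eq, Prod.mk.injEq]
      rw [if_neg (by intro hc; omega)]
      simp

theorem pvLoop (W H seconds : Int) (robots : List ((Int × Int) × (Int × Int)))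
    (hW : 0 < W) (hH : 0 < H) (acc : List (Int × Int)) :
    robots.foldl (fun room r =>
        let gx := PySem.Int.mod (r.1.1 + seconds * r.2.1) W
        let gy := PySem.Int.mod (r.1.2 + seconds * r.2.2) H
        room.modify gy.toNat (fun row => row.modify gx.toNat (· + 1))) (pvGridOf W H acc)
      = pvGridOf W H (acc ++ robots.map (fun r =>
          (PySem.Int.mod (r.1.1 + seconds * r.2.1) W,
           PySem.Int.mod (r.1.2 + seconds * r.2.2) H))) := by
  induction robots generalizing acc with
  | nil => simp
  | cons r rs ih =>
    simp only [List.foldl_cons, List.map_cons]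
    rw [pvStep W H acc _ _
      (PySem.Int.mod_nonneg _ hW) (PySem.Int.mod_lt _ hW)
      (PySem.Int.mod_nonneg _ hH) (PySem.Int.mod_lt _ hH)]
    rw [ih (acc ++ [_])]
    simp

theorem pvInit (W H : Int) :
    (PySem.List.pyRange 0 H 1).map (fun _ => List.replicate W.toNat (0 : Int))
      = pvGridOf W H [] := by
  unfold pvGridOf
  apply List.map_congr_left
  intro y _
  have h0 : (fun x : Int => (PySem.List.count ([] : List (Int × Int)) (x, y) : Int))
      = fun _ : Int => (0 : Int) := by
    funext x
    simp [PySem.List.count_eq]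
  rw [h0, List.map_const', PySem.List.length_pyRange_one]
  norm_num

-- ---- B-side: the sorted sweep builds the same count grid ----

-- zero-padding a short row to width W reads it back cell by cell
theorem pvPadEq (W : Int) (row : List Int) (h : (row.length : Int) ≤ W) :
    row ++ List.replicate (W - (row.length : Int)).toNat 0
      = (PySem.List.pyRange 0 W 1).map (fun x => row.getD x.toNat 0) := by
  apply List.ext_getElem
  · simp [PySem.List.length_pyRange_one]
    omega
  · intro i h1 h2
    have hiW : i < (W - 0).toNat := by
      simpa [PySem.List.length_pyRange_one] using h2
    simp only [List.getElem_map, PySem.List.getElem_pyRange_one]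
    have hidx : ((0 : Int) + (i : Int)).toNat = i := by omega
    rw [hidx]
    by_cases hi : i < row.length
    · rw [List.getElem_append_left hi, List.getD_eq_getElem row 0 hi]
    · rw [List.getElem_append_right (by omega)]
      rw [List.getD_eq_default row 0 (by omega)]
      simp

-- invariant of the inner sweep loop: padded result row = old row + counts; the remaining
-- suffix starts at the next row, stays sorted, and keeps the counts of later cells
theorem pvFill_spec (W y : Int) (hW : 0 < W) (cs : List Int) : ∀ (row : List Int),
    cs.Pairwise (· ≤ ·) →
    (∀ c ∈ cs, y * W ≤ c) →
    (row.length : Int) ≤ W →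
    (∀ c ∈ cs, c < (y + 1) * W → (row.length : Int) ≤ c - y * W + 1) →
    ((pvFillRow W y row cs).1 ++ List.replicate (W - ((pvFillRow W y row cs).1.length : Int)).toNat 0
        = (PySem.List.pyRange 0 W 1).map (fun x => row.getD x.toNat 0 + (cs.count (y * W + x) : Int)))
    ∧ (∀ c ∈ (pvFillRow W y row cs).2, (y + 1) * W ≤ c)
    ∧ (pvFillRow W y row cs).2.Pairwise (· ≤ ·)
    ∧ (∀ v : Int, (y + 1) * W ≤ v → (pvFillRow W y row cs).2.count v = cs.count v) := by
  induction cs with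
  | nil =>
    intro row _ _ hrowW _
    have h : pvFillRow W y row [] = (row, []) := rfl
    refine ⟨?_, by simp [h], by simp [h], by simp [h]⟩
    simp only [h]
    rw [pvPadEq W row hrowW]
    simp
  | cons c cs ih =>
    intro row hsort hlow hrowW hlen
    have hexp : (y + 1) * W = y * W + W := by ring
    rw [List.pairwise_cons] at hsort
    obtain ⟨hc_le, hsort'⟩ := hsort
    by_cases hc : c < (y + 1) * W
    · have hx0 : 0 ≤ c - y * W := by have := hlow c (by simp); omega
      have hxW : c - y * W < W := by omega
      have hx1 : (row.length : Int) ≤ c - y * W + 1 := hlen c (by simp) hc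
      -- the row after inserting c
      set x : Int := c - y * W with hxdef
      have hkey : ∀ row' : List Int,
          pvFillRow W y row (c :: cs) = pvFillRow W y row' cs →
          (row'.length : Int) ≤ W →
          (∀ c' ∈ cs, c' < (y + 1) * W → (row'.length : Int) ≤ c' - y * W + 1) →
          (∀ t : Int, 0 ≤ t → t < W →
            row'.getD t.toNat 0 = row.getD t.toNat 0 + (if t = x then 1 else 0)) →
          ((pvFillRow W y row (c :: cs)).1 ++ List.replicate (W - ((pvFillRow W y row (c :: cs)).1.length : Int)).toNat 0
              = (PySem.List.pyRange 0 W 1).map (fun t => row.getD t.toNat 0 + ((c :: cs).count (y * W + t) : Int)))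
          ∧ (∀ c' ∈ (pvFillRow W y row (c :: cs)).2, (y + 1) * W ≤ c')
          ∧ (pvFillRow W y row (c :: cs)).2.Pairwise (· ≤ ·)
          ∧ (∀ v : Int, (y + 1) * W ≤ v → (pvFillRow W y row (c :: cs)).2.count v = (c :: cs).count v) := by
        intro row' heq hW' hlen' hgetD
        obtain ⟨ih1, ih2, ih3, ih4⟩ := ih row' hsort' (fun c' hc' => by have := hc_le c' hc'; have := hlow c (by simp); omega) hW' hlen'
        rw [heq]
        refine ⟨?_, ih2, ih3, ?_⟩
        · rw [ih1]
          apply List.map_congr_left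
          intro t ht
          have htW : 0 ≤ t ∧ t < W := by
            rw [List.mem_iff_getElem] at ht
            obtain ⟨k, hk, hkt⟩ := ht
            rw [PySem.List.getElem_pyRange_one] at hkt
            rw [PySem.List.length_pyRange_one] at hk
            omega
          rw [hgetD t htW.1 htW.2, List.count_cons]
          have : (c == y * W + t) = decide (t = x) := by
            by_cases h : t = x
            · have hce : c = y * W + t := by omega
              simp [h, hce]
            · have hce : ¬ (c = y * W + t) := by omega
              simp [h, hce]
          rw [this]
          by_cases h : t = x <;> simp [h] <;> push_cast <;> ring
        · intro v hv
          rw [ih4 v hv, List.count_cons]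
          have : ¬ (c = v) := by omega
          simp [this]
      by_cases heq : (row.length : Int) = x + 1
      · -- row[-1] += 1
        have hlenpos : 0 < row.length := by omega
        have hunf : pvFillRow W y row (c :: cs)
            = pvFillRow W y (row.modify (row.length - 1) (· + 1)) cs := by
          rw [pvFillRow]
          simp only [hc, if_pos, ← hxdef, heq, if_true]
        apply hkey _ hunf
        · rw [List.length_modify]; exact hrowW
        · intro c' hc' hlt
          rw [List.length_modify]
          have := hc_le c' hc'
          omega
        · intro t ht0 htW
          by_cases hlt : t.toNat < row.length
          · rw [List.getD_eq_getElem _ 0 (by rw [List.length_modify]; omega),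
              List.getD_eq_getElem _ 0 hlt, List.getElem_modify]
            by_cases h : t = x
            · rw [if_pos (by omega)]
              simp [h]
            · rw [if_neg (by omega)]
              simp [h]
          · rw [List.getD_eq_default _ 0 (by rw [List.length_modify]; omega),
              List.getD_eq_default _ 0 (by omega)]
            have : ¬ (t = x) := by omega
            simp [this]
      · -- row += [0]*(x-len(row)) + [1]
        have hlt : (row.length : Int) ≤ x := by omega
        have hunf : pvFillRow W y row (c :: cs)
            = pvFillRow W y (row ++ List.replicate (x - (row.length : Int)).toNat 0 ++ [1]) cs := by
          rw [pvFillRow]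
          simp only [hc, if_pos, ← hxdef, heq, if_false]
        have hlen' : ((row ++ List.replicate (x - (row.length : Int)).toNat 0 ++ [1]).length : Int) = x + 1 := by
          simp [List.length_append]
          omega
        apply hkey _ hunf
        · omega
        · intro c' hc' hcc
          have := hc_le c' hc'
          omega
        · intro t ht0 htW
          have hrep : (List.replicate (x - (row.length : Int)).toNat (0 : Int)).length
              = (x - (row.length : Int)).toNat := List.length_replicate
          by_cases h1 : t.toNat < row.length
          · rw [List.getD_append _ _ _ _ (by rw [List.length_append, hrep]; omega),
              List.getD_append _ _ _ _ h1]
            have : ¬ (t = x) := by omega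
            simp [this]
          · by_cases h2 : t < x
            · rw [List.getD_append _ _ _ _ (by rw [List.length_append, hrep]; omega),
                List.getD_append_right _ _ _ _ (by omega)]
              have hz : (List.replicate (x - (row.length : Int)).toNat (0 : Int)).getD (t.toNat - row.length) 0 = 0 := by
                by_cases hh : t.toNat - row.length < (x - (row.length : Int)).toNat
                · exact List.getD_replicate 0 hh
                · exact List.getD_eq_default _ _ (by rw [List.length_replicate]; omega)
              rw [hz, List.getD_eq_default row 0 (by omega)]
              have : ¬ (t = x) := by omega
              simp [this]
            · by_cases h3 : t = x
              · rw [List.getD_append_right _ _ _ _ (by rw [List.length_append, hrep]; omega)]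
                have hz : t.toNat - (row ++ List.replicate (x - (row.length : Int)).toNat 0).length = 0 := by
                  rw [List.length_append, hrep]; omega
                rw [hz, List.getD_eq_default row 0 (by omega)]
                simp [h3]
              · rw [List.getD_eq_default (row ++ List.replicate (x - (row.length : Int)).toNat 0 ++ [1]) 0 (by
                    rw [List.length_append, List.length_append, hrep]; simp; omega),
                  List.getD_eq_default row 0 (by omega)]
                simp [h3]
    · -- head already beyond this row: stop
      have hstop : pvFillRow W y row (c :: cs) = (row, c :: cs) := by
        rw [pvFillRow]
        simp [hc]
      rw [hstop]
      refine ⟨?_, ?_, ?_, by simp⟩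
      · rw [pvPadEq W row hrowW]
        apply List.map_congr_left
        intro t ht
        have htW : 0 ≤ t ∧ t < W := by
          rw [List.mem_iff_getElem] at ht
          obtain ⟨k, hk, hkt⟩ := ht
          rw [PySem.List.getElem_pyRange_one] at hkt
          rw [PySem.List.length_pyRange_one] at hk
          omega
        have hnot : (y * W + t) ∉ (c :: cs) := by
          intro hmem
          rcases List.mem_cons.mp hmem with h | h
          · omega
          · have := hc_le _ h
            omega
        rw [List.count_eq_zero.mpr hnot]
        simp
      · intro c' hc'
        rcases List.mem_cons.mp hc' with h | h
        · omega
        · have := hc_le _ h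
          omega
      · exact List.pairwise_cons.mpr ⟨hc_le, hsort'⟩

-- the outer 'for y in range(H)' sweep over a sorted suffix emits count rows
theorem pvSweep (W H : Int) (hW : 0 < W) : ∀ (k : Nat) (y : Int), (H - y).toNat = k →
    ∀ (acc : List (List Int)) (cs : List Int),
    cs.Pairwise (· ≤ ·) → (∀ c ∈ cs, y * W ≤ c) →
    ((PySem.List.pyRange y H 1).foldl (fun st yy =>
        let res := pvFillRow W yy [] st.2
        (st.1 ++ [res.1 ++ List.replicate (W - (res.1.length : Int)).toNat 0], res.2))
      (acc, cs)).1
      = acc ++ (PySem.List.pyRange y H 1).map (fun yy =>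
          (PySem.List.pyRange 0 W 1).map (fun x => (cs.count (yy * W + x) : Int))) := by
  intro k
  induction k with
  | zero =>
    intro y hk acc cs _ _
    have hnil : PySem.List.pyRange y H 1 = [] := by
      apply List.eq_nil_of_length_eq_zero
      rw [PySem.List.length_pyRange_one]
      omega
    simp [hnil]
  | succ k ihk =>
    intro y hk acc cs hsort hlow
    have hyH : y < H := by omega
    rw [PySem.List.pyRange_one_cons hyH]
    simp only [List.foldl_cons, List.map_cons]
    obtain ⟨f1, f2, f3, f4⟩ := pvFill_spec W y hW cs [] hsort hlow (by simp; omega)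
      (fun c hc hlt => by have := hlow c hc; simp; omega)
    rw [ihk (y + 1) (by omega) _ _ f3 f2]
    have hrow : (pvFillRow W y [] cs).1 ++ List.replicate (W - ((pvFillRow W y [] cs).1.length : Int)).toNat 0
        = (PySem.List.pyRange 0 W 1).map (fun x => (cs.count (y * W + x) : Int)) := by
      rw [f1]
      apply List.map_congr_left
      intro t _
      simp
    rw [hrow]
    have hcnt : (PySem.List.pyRange (y + 1) H 1).map (fun yy =>
          (PySem.List.pyRange 0 W 1).map (fun x => ((pvFillRow W y [] cs).2.count (yy * W + x) : Int)))
        = (PySem.List.pyRange (y + 1) H 1).map (fun yy =>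
          (PySem.List.pyRange 0 W 1).map (fun x => (cs.count (yy * W + x) : Int))) := by
      apply List.map_congr_left
      intro yy hyy
      have hyy1 : y + 1 ≤ yy := by
        rw [List.mem_iff_getElem] at hyy
        obtain ⟨k', hk', hkt⟩ := hyy
        rw [PySem.List.getElem_pyRange_one] at hkt
        omega
      apply List.map_congr_left
      intro x hx
      have hx0 : 0 ≤ x := by
        rw [List.mem_iff_getElem] at hx
        obtain ⟨k', hk', hkt⟩ := hx
        rw [PySem.List.getElem_pyRange_one] at hkt
        omega
      rw [f4]
      have : (y + 1) * W ≤ yy * W := by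
        apply mul_le_mul_of_nonneg_right hyy1 (le_of_lt hW)
      omega
    rw [hcnt]
    simp

-- flat encoding b*W+a is injective on a row-strip
theorem pvEncEq (W a b x y : Int) (hW : 0 < W) (ha : 0 ≤ a) (haW : a < W)
    (hx : 0 ≤ x) (hxW : x < W) : (b * W + a = y * W + x) ↔ (a = x ∧ b = y) := by
  constructor
  · intro h
    have hb : b = y := by
      have h1 : (b * W + a) / W = b := by
        rw [add_comm, Int.add_mul_ediv_right _ _ (by omega)]
        rw [Int.ediv_eq_zero_of_lt ha haW]
        simp
      have h2 : (y * W + x) / W = y := by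
        rw [add_comm, Int.add_mul_ediv_right _ _ (by omega)]
        rw [Int.ediv_eq_zero_of_lt hx hxW]
        simp
      rw [h] at h1
      omega
    constructor
    · rw [hb] at h; omega
    · exact hb
  · intro ⟨h1, h2⟩
    rw [h1, h2]

-- counting a flat cell index among encoded goals = counting the (x,y) pair among goals
theorem pvCountEnc (W : Int) (hW : 0 < W) (g : List (Int × Int)) (x y : Int)
    (hx : 0 ≤ x) (hxW : x < W) (hg : ∀ p ∈ g, 0 ≤ p.1 ∧ p.1 < W) :
    (g.map (fun p => p.2 * W + p.1)).count (y * W + x) = g.count (x, y) := by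
  rw [List.count_eq_countP, List.countP_map, List.count_eq_countP]
  apply List.countP_congr
  intro p hp
  obtain ⟨hp0, hpW⟩ := hg p hp
  have hiff := pvEncEq W p.1 p.2 x y hW hp0 hpW hx hxW
  simp only [Function.comp_apply, beq_iff_eq, Prod.ext_iff]
  constructor
  · intro h
    exact hiff.mp h
  · intro h
    exact hiff.mpr h

-- robots = [] : both sides are rows of zeros (any W, H)
theorem pvSweepNil (W H : Int) : ∀ (k : Nat) (y : Int), (H - y).toNat = k →
    ∀ (acc : List (List Int)),
    ((PySem.List.pyRange y H 1).foldl (fun st yy =>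
        let res := pvFillRow W yy [] st.2
        (st.1 ++ [res.1 ++ List.replicate (W - (res.1.length : Int)).toNat 0], res.2))
      (acc, ([] : List Int))).1
      = acc ++ (PySem.List.pyRange y H 1).map (fun _ => List.replicate W.toNat 0) := by
  intro k
  induction k with
  | zero =>
    intro y hk acc
    have hnil : PySem.List.pyRange y H 1 = [] := by
      apply List.eq_nil_of_length_eq_zero
      rw [PySem.List.length_pyRange_one]
      omega
    simp [hnil]
  | succ k ihk =>
    intro y hk acc
    have hyH : y < H := by omega
    rw [PySem.List.pyRange_one_cons hyH]
    simp only [List.foldl_cons, List.map_cons]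
    have hfill : pvFillRow W y ([] : List Int) ([] : List Int) = ([], []) := by
      rw [pvFillRow]
    rw [hfill]
    rw [ihk (y + 1) (by omega) _]
    simp

-- ===== VERDICT (by name: the statement is the Claim_ definition above) =====
theorem room_state_spec : Claim_equal_room_state := by
  intro size seconds robots _ hpre
  obtain ⟨W, H⟩ := size
  show room_state (W, H) seconds robots = room_state_alt (W, H) seconds robots
  rcases hpre with h | ⟨hW', hH'⟩
  · -- robots = [] : rows of zeros on both sides
    subst h
    simp only [room_state, List.foldl_nil, room_state_alt, List.map_nil]
    have hsorted : PySem.List.sorted ([] : List Int) (fun c => c) false = [] := by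
      rw [PySem.List.sorted_eq_nil_iff]
    rw [hsorted, pvSweepNil W H (H - 0).toNat 0 rfl []]
    simp
  · -- main case
    have hW : 0 < W := hW'
    have hH : 0 < H := hH'
    set goalsA : List (Int × Int) := robots.map (fun r =>
      (PySem.Int.mod (r.1.1 + seconds * r.2.1) W,
       PySem.Int.mod (r.1.2 + seconds * r.2.2) H)) with hgA
    have hA : room_state (W, H) seconds robots = pvGridOf W H goalsA := by
      simp only [room_state]
      rw [pvInit, pvLoop W H seconds robots hW hH []]
      simp
      rw [← hgA]
    rw [hA]
    -- B side
    set cellsRaw : List Int := robots.map (fun r =>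
      (PySem.Int.mod (r.1.2 + seconds * r.2.2) H) * W
        + PySem.Int.mod (r.1.1 + seconds * r.2.1) W) with hcR
    have hmm : cellsRaw = goalsA.map (fun p => p.2 * W + p.1) := by
      rw [hgA, List.map_map]
      rfl
    set cells : List Int := PySem.List.sorted cellsRaw (fun c => c) false with hcs
    have hBdef : room_state_alt (W, H) seconds robots
        = ((PySem.List.pyRange 0 H 1).foldl (fun st y =>
            let res := pvFillRow W y [] st.2
            (st.1 ++ [res.1 ++ List.replicate (W - (res.1.length : Int)).toNat 0], res.2))
          (([] : List (List Int)), cells)).1 := rfl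
    have hperm : cells.Perm cellsRaw := PySem.List.sorted_perm cellsRaw (fun c => c) false
    have hsort : cells.Pairwise (· ≤ ·) := by
      have := PySem.List.sorted_pairwise cellsRaw (fun c => c)
      simpa using this
    have hlow : ∀ c ∈ cells, 0 * W ≤ c := by
      intro c hc
      have hc' : c ∈ cellsRaw := by
        rw [PySem.List.mem_sorted] at hc
        exact hc
      rw [hcR] at hc'
      rw [List.mem_map] at hc'
      obtain ⟨r, _, hr⟩ := hc'
      have h1 := PySem.Int.mod_nonneg (r.1.2 + seconds * r.2.2) hH
      have h2 := PySem.Int.mod_nonneg (r.1.1 + seconds * r.2.1) hW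
      have h3 : 0 ≤ (PySem.Int.mod (r.1.2 + seconds * r.2.2) H) * W :=
        mul_nonneg h1 (le_of_lt hW)
      omega
    rw [hBdef, pvSweep W H hW (H - 0).toNat 0 rfl [] cells hsort hlow]
    simp only [List.nil_append]
    unfold pvGridOf
    apply List.map_congr_left
    intro y _
    apply List.map_congr_left
    intro x hx
    have hx' : 0 ≤ x ∧ x < W := by
      rw [List.mem_iff_getElem] at hx
      obtain ⟨k, hk, hkt⟩ := hx
      rw [PySem.List.getElem_pyRange_one] at hkt
      rw [PySem.List.length_pyRange_one] at hk
      omega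
    rw [hperm.count_eq, hmm]
    rw [pvCountEnc W hW goalsA x y hx'.1 hx'.2]
    · rw [PySem.List.count_eq]
    · intro p hp
      rw [hgA, List.mem_map] at hp
      obtain ⟨r, _, hr⟩ := hp
      have h1 := PySem.Int.mod_nonneg (r.1.1 + seconds * r.2.1) hW
      have h2 := PySem.Int.mod_lt (r.1.1 + seconds * r.2.1) hW
      constructor <;> (rw [← hr]; simpa)
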